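-- pv_equiv track=rewrite | github.com/mikebsg01/Competitive-Programming | CodeFights/Arcade/Graphs/Kingdom Roads/RoadsBuilding.py | roadsBuilding
-- ===== SOURCE A (Python) =====
-- def roadsBuilding(c, r):
--     m = [[False for i in range(c)] for j in range(c)]
--     ans = []
--     for i in range(len(r)):
--         m[r[i][0]][r[i][1]] = m[r[i][1]][r[i][0]] = True
--     for i in range(c):
--         for j in range(c):
--             if i != j and not m[i][j]:
--                 m[i][j] = m[j][i] = True
--                 ans.append([i, j])
--     return ans
-- ===== SOURCE B (Python) =====
-- def roadsBuilding(c, r):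
--     # Endpoints are reduced mod c (= how A's matrix indexing resolves them, incl.
--     # negative endpoints).  Sort the deduplicated given edges by the code i*c+j of
--     # their ordered endpoint pair, then walk all pairs i < j in the same order with
--     # a single pointer into that sorted list, emitting every pair the pointer skips.
--     edges = sorted({min(e[0] % c, e[1] % c) * c + max(e[0] % c, e[1] % c)
--                     for e in r if e[0] % c != e[1] % c})
--     it = iter(edges)
--     nxt = next(it, None)
--     ans = []
--     for i in range(c):
--         for j in range(i + 1, c):
--             if nxt == i * c + j:
--                 nxt = next(it, None)
--             else:
--                 ans.append([i, j])
--     return ans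
-- ===== Notes on version B (the rewrite author's own statement) =====
-- stated objective: alternative
-- what changed: B replaces A's mutable c x c adjacency matrix (marked symmetrically from r, then re-marked in place while scanning all c^2 ordered cells to deduplicate) by sorting the deduplicated given edges by the integer code i*c+j of their endpoint pair (endpoints reduced mod c, which is how A's matrix indexing resolves them) and doing one merge-style sweep of the upper-triangle pairs with a single pointer into that sorted list, emitting every pair the pointer skips - no matrix, no mutation, no per-pair membership test.
import Mathlib
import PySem

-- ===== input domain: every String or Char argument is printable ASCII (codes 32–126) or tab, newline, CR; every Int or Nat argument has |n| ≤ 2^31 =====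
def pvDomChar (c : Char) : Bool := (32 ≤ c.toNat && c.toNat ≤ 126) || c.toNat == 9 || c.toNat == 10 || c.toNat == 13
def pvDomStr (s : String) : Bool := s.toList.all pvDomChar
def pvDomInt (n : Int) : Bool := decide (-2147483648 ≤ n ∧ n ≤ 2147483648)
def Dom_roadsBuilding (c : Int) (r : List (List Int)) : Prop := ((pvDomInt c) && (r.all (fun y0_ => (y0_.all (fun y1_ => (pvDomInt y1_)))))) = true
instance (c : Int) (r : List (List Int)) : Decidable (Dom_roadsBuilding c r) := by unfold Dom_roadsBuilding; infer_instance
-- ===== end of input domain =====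

-- B drops A's mutable c×c adjacency matrix and its in-place marking: it sorts the
-- deduplicated given edges by the code i*c+j of their endpoint pair (endpoints
-- reduced mod c, which is how A's matrix indexing resolves them) and does one
-- merge-style sweep over the upper-triangle pairs with a single pointer into that
-- sorted list, emitting every pair the pointer skips (alternative algorithm,
-- similar cost).

-- ===== PORT A =====
-- the Python statement 'm[x][y] = True' (read row m[x], set cell y, write the row back)
def pvMark (m : List (List Bool)) (x y : Int) : List (List Bool) :=
  PySem.List.pySetD m x (PySem.List.pySetD (PySem.List.pyGetD m x []) y true)

def roadsBuilding (c : Int) (r : List (List Int)) : List (List Int) :=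
  let m0 : List (List Bool) :=
    (PySem.List.pyRange 0 c).map (fun _ => (PySem.List.pyRange 0 c).map (fun _ => false))
  let m1 : List (List Bool) :=
    (PySem.List.pyRange 0 (PySem.List.len r)).foldl
      (fun m i =>
        pvMark
          (pvMark m (PySem.List.pyGetD (PySem.List.pyGetD r i []) 0 0)
            (PySem.List.pyGetD (PySem.List.pyGetD r i []) 1 0))
          (PySem.List.pyGetD (PySem.List.pyGetD r i []) 1 0)
          (PySem.List.pyGetD (PySem.List.pyGetD r i []) 0 0))
      m0
  let st :=
    (PySem.List.pyRange 0 c).foldl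
      (fun st i =>
        (PySem.List.pyRange 0 c).foldl
          (fun st j =>
            if i ≠ j ∧ PySem.List.pyGetD (PySem.List.pyGetD st.1 i []) j false = false then
              (pvMark (pvMark st.1 i j) j i, st.2 ++ [[i, j]])
            else st)
          st)
      (m1, ([] : List (List Int)))
  st.2

-- ===== PORT B =====
def roadsBuilding_alt (c : Int) (r : List (List Int)) : List (List Int) :=
  -- edges = sorted({min(e[0]%c,e[1]%c)*c + max(e[0]%c,e[1]%c) for e in r if e[0]%c != e[1]%c})
  let edges : List Int :=
    PySem.List.sorted
      (PySem.Set.ofList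
        ((r.filter (fun e =>
            PySem.Int.mod (PySem.List.pyGetD e 0 0) c !=
            PySem.Int.mod (PySem.List.pyGetD e 1 0) c)).map
          (fun e =>
            min (PySem.Int.mod (PySem.List.pyGetD e 0 0) c)
                (PySem.Int.mod (PySem.List.pyGetD e 1 0) c) * c +
            max (PySem.Int.mod (PySem.List.pyGetD e 0 0) c)
                (PySem.Int.mod (PySem.List.pyGetD e 1 0) c))))
      (fun x => x) false
  -- it = iter(edges); nxt = next(it, None); merge-sweep over pairs i < j
  let st :=
    (PySem.List.pyRange 0 c).foldl
      (fun st i =>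
        (PySem.List.pyRange (i + 1) c).foldl
          (fun st j =>
            if st.1 = some (i * c + j) then (st.2.1.head?, st.2.1.tail, st.2.2)
            else (st.1, st.2.1, st.2.2 ++ [[i, j]]))
          st)
      (edges.head?, edges.tail, ([] : List (List Int)))
  st.2.2

-- ===== PRECONDITION & SPEC =====
-- Pre_ excludes exactly the inputs where A raises IndexError: a road with fewer than
-- two entries, or an endpoint outside Python's accepted index range [-c, c-1] for the
-- c×c matrix.
def Pre_roadsBuilding (c : Int) (r : List (List Int)) : Prop :=
  ∀ e ∈ r, 2 ≤ e.length ∧ ∀ v ∈ e.take 2, -c ≤ v ∧ v < c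

instance (c : Int) (r : List (List Int)) : Decidable (Pre_roadsBuilding c r) := by
  unfold Pre_roadsBuilding; infer_instance

def pvWitness_roadsBuilding : Int × List (List Int) := (3, [[0, 1]])

def Spec_roadsBuilding (c : Int) (r : List (List Int)) (out : List (List Int)) : Prop :=
  out = roadsBuilding_alt c r

instance (c : Int) (r : List (List Int)) (out : List (List Int)) :
    Decidable (Spec_roadsBuilding c r out) := by unfold Spec_roadsBuilding; infer_instance

-- ===== CLAIM =====
def Claim_equal_roadsBuilding : Prop :=
  ∀ (c : Int) (r : List (List Int)), Dom_roadsBuilding c r → Pre_roadsBuilding c r →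
    Spec_roadsBuilding c r (roadsBuilding c r)

-- ===== LEMMAS AND PROOFS =====

def pvWrap (c v : Int) : Int := if v < 0 then v + c else v

def pvEnds? (e : List Int) : Option (Int × Int) :=
  match e with
  | a :: b :: _ => some (a, b)
  | _ => none

theorem pvWrap_emod {c v : Int} (_hc : 0 < c) (h1 : -c ≤ v) (h2 : v < c) :
    v % c = pvWrap c v := by
  unfold pvWrap
  split_ifs with hv
  · have h3 : v % c = (v + c) % c := by
      conv_rhs => rw [show v + c = v + c * 1 by ring]
      rw [Int.add_mul_emod_self_left]
    rw [h3, Int.emod_eq_of_lt (by omega) (by omega)]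
  · exact Int.emod_eq_of_lt (by omega) h2

-- matrix cell read m[x][y]
def pvG (m : List (List Bool)) (x y : Int) : Bool :=
  PySem.List.pyGetD (PySem.List.pyGetD m x []) y false

-- the symmetric "road given" predicate after A's first loop
def pvCov (c : Int) (r : List (List Int)) (x y : Int) : Bool :=
  r.any (fun e =>
    match pvEnds? e with
    | some (a, b) =>
        (pvWrap c a == x && pvWrap c b == y) || (pvWrap c a == y && pvWrap c b == x)
    | none => false)

-- m is a c×c matrix whose in-range cells compute f
def pvRep (c : Int) (m : List (List Bool)) (f : Int → Int → Bool) : Prop :=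
  m.length = c.toNat ∧ (∀ row ∈ m, row.length = c.toNat) ∧
    ∀ x y, 0 ≤ x → x < c → 0 ≤ y → y < c → pvG m x y = f x y

theorem pvRep_congr {c : Int} {m : List (List Bool)} {f g : Int → Int → Bool}
    (h : pvRep c m f) (hfg : ∀ x y, 0 ≤ x → x < c → 0 ≤ y → y < c → f x y = g x y) :
    pvRep c m g := by
  refine ⟨h.1, h.2.1, fun x y hx hx2 hy hy2 => ?_⟩
  rw [h.2.2 x y hx hx2 hy hy2, hfg x y hx hx2 hy hy2]

theorem pvIdx_eq {n : Nat} {i : Int} (h1 : -(n : Int) ≤ i) (h2 : i < n) :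
    PySem.List.pyIdx? n i = some (pvWrap n i).toNat := by
  simp only [PySem.List.pyIdx?, pvWrap]
  split_ifs <;> simp <;> omega

theorem pvGetD_eq {α : Type} (xs : List α) (d : α) (i : Int)
    (h1 : -(xs.length : Int) ≤ i) (h2 : i < xs.length) :
    PySem.List.pyGetD xs i d = xs.getD (pvWrap xs.length i).toNat d := by
  simp only [PySem.List.pyGetD, PySem.List.pyGet?, pvIdx_eq h1 h2, Option.bind_some,
    List.getD_eq_getElem?_getD]

theorem pvSetD_eq {α : Type} (xs : List α) (v : α) (i : Int)
    (h1 : -(xs.length : Int) ≤ i) (h2 : i < xs.length) :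
    PySem.List.pySetD xs i v = xs.set (pvWrap xs.length i).toNat v := by
  simp only [PySem.List.pySetD, PySem.List.pySet?, pvIdx_eq h1 h2, Option.map_some,
    Option.getD_some]

theorem pvWrap_bounds {c v : Int} (h1 : -c ≤ v) (h2 : v < c) :
    0 ≤ pvWrap c v ∧ pvWrap c v < c := by
  simp only [pvWrap]; split_ifs <;> omega

theorem pvWrap_nonneg {c v : Int} (h : 0 ≤ v) : pvWrap c v = v := by
  simp only [pvWrap]; split_ifs <;> omega

theorem pvG_eq? (m : List (List Bool)) (p q : Int) (hp : 0 ≤ p) (hq : 0 ≤ q) :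
    pvG m p q = ((m[p.toNat]?).getD [])[q.toNat]?.getD false := by
  unfold pvG
  simp [PySem.List.pyGetD, PySem.List.pyGet?_of_nonneg, hp, hq]

theorem pvRep_mark {c : Int} {m : List (List Bool)} {f : Int → Int → Bool} {x y : Int}
    (h : pvRep c m f) (hx1 : -c ≤ x) (hx2 : x < c) (hy1 : -c ≤ y) (hy2 : y < c)
    (hc : 0 < c) :
    pvRep c (pvMark m x y)
      (fun p q => (decide (p = pvWrap c x) && decide (q = pvWrap c y)) || f p q) := by
  obtain ⟨hlen, hrows, hent⟩ := h
  have hlc : (m.length : Int) = c := by rw [hlen]; omega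
  have hwx := pvWrap_bounds hx1 hx2
  have hwy := pvWrap_bounds hy1 hy2
  have hkx : (pvWrap c x).toNat < m.length := by omega
  have hrow : PySem.List.pyGetD m x [] = m[(pvWrap c x).toNat] := by
    rw [pvGetD_eq m [] x (by omega) (by omega), hlc,
      List.getD_eq_getElem?_getD, List.getElem?_eq_getElem hkx]
    rfl
  have hrowmem : m[(pvWrap c x).toNat] ∈ m := List.getElem_mem hkx
  have hrowlen : (m[(pvWrap c x).toNat] : List Bool).length = c.toNat := hrows _ hrowmem
  have hky : (pvWrap c y).toNat < (m[(pvWrap c x).toNat] : List Bool).length := by omega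
  have hmark : pvMark m x y =
      m.set (pvWrap c x).toNat (m[(pvWrap c x).toNat].set (pvWrap c y).toNat true) := by
    unfold pvMark
    rw [hrow, pvSetD_eq _ true y (by rw [hrowlen]; omega) (by rw [hrowlen]; omega),
      pvSetD_eq m _ x (by omega) (by omega), hlc]
    have hcn : ((c.toNat : Int)) = c := by omega
    rw [hrowlen, hcn]
  rw [hmark]
  refine ⟨by simpa using hlen, ?_, ?_⟩
  · intro row hmem
    rcases List.mem_or_eq_of_mem_set hmem with h' | h'
    · exact hrows _ h'
    · rw [h', List.length_set]; exact hrowlen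
  · intro p q hp hp2 hq hq2
    have hA := hent p q hp hp2 hq hq2
    rw [pvG_eq? m p q hp hq] at hA
    rw [pvG_eq? _ p q hp hq]
    simp only [List.getElem?_set]
    by_cases hpx : (pvWrap c x).toNat = p.toNat
    · have hpeq : p = pvWrap c x := by omega
      rw [if_pos hpx, if_pos (show (pvWrap c x).toNat < m.length by omega)]
      simp only [Option.getD_some, List.getElem?_set]
      by_cases hqy : (pvWrap c y).toNat = q.toNat
      · have hqeq : q = pvWrap c y := by omega
        rw [if_pos hqy,
          if_pos (show (pvWrap c y).toNat < (m[(pvWrap c x).toNat] : List Bool).length by omega)]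
        simp [hpeq, hqeq]
      · have hqne : ¬ (q = pvWrap c y) := by omega
        rw [if_neg hqy]
        have hsome : m[p.toNat]? = some (m[(pvWrap c x).toNat]) := by
          rw [← hpx]; exact List.getElem?_eq_getElem hkx
        rw [hsome, Option.getD_some] at hA
        rw [hA]
        simp [hqne]
    · have hpne : ¬ (p = pvWrap c x) := by omega
      rw [if_neg hpx, hA]
      simp [hpne]

theorem pvGetD_zero' {a b : Int} (t : List Int) (d : Int) :
    PySem.List.pyGetD (a :: b :: t) 0 d = a := by
  simp [PySem.List.pyGetD_zero_cons]

theorem pvGetD_one {a b : Int} (t : List Int) (d : Int) :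
    PySem.List.pyGetD (a :: b :: t) 1 d = b := by
  simp [PySem.List.pyGetD, PySem.List.pyGet?, PySem.List.pyIdx?]

theorem pvCov_symm (c : Int) (r : List (List Int)) (x y : Int) :
    pvCov c r x y = pvCov c r y x := by
  unfold pvCov
  induction r with
  | nil => rfl
  | cons e l ih =>
    simp only [List.any_cons, ih]
    congr 1
    cases he : pvEnds? e with
    | none => rfl
    | some p => cases p; exact Bool.or_comm _ _

-- after A's first loop the matrix computes pvCov
theorem pvRep_loop1 {c : Int} (hc : 0 < c) :
    ∀ (l : List (List Int)) (m : List (List Bool)) (f : Int → Int → Bool),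
      pvRep c m f →
      (∀ e ∈ l, 2 ≤ e.length ∧ ∀ v ∈ e.take 2, -c ≤ v ∧ v < c) →
      pvRep c
        (l.foldl
          (fun m e =>
            pvMark
              (pvMark m (PySem.List.pyGetD e 0 0) (PySem.List.pyGetD e 1 0))
              (PySem.List.pyGetD e 1 0) (PySem.List.pyGetD e 0 0))
          m)
        (fun p q => pvCov c l p q || f p q) := by
  intro l
  induction l with
  | nil =>
    intro m f hm _
    exact pvRep_congr hm (by intro x y _ _ _ _; simp [pvCov])
  | cons e l ih =>
    intro m f hm hpre
    obtain ⟨hlen2, hbnd⟩ := hpre e (by simp)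
    cases e with
    | nil => simp at hlen2
    | cons a e1 =>
      cases e1 with
      | nil => simp at hlen2
      | cons b t =>
        have ha := hbnd a (by simp)
        have hb := hbnd b (by simp)
        simp only [List.foldl_cons, pvGetD_zero', pvGetD_one]
        have h1 := pvRep_mark hm ha.1 ha.2 hb.1 hb.2 hc
        have h2 := pvRep_mark h1 hb.1 hb.2 ha.1 ha.2 hc
        have h3 := ih _ _ h2 (fun e' he' => hpre e' (List.mem_cons_of_mem _ he'))
        refine pvRep_congr h3 ?_
        intro x y hx hx2 hy hy2
        rw [Bool.eq_iff_iff]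
        simp only [pvCov, List.any_cons, pvEnds?, Bool.or_eq_true, Bool.and_eq_true,
          decide_eq_true_eq, beq_iff_eq, List.any_eq_true]
        constructor
        · rintro (h | (⟨h1, h2⟩ | (⟨h1, h2⟩ | h)))
          · exact Or.inl (Or.inr h)
          · exact Or.inl (Or.inl (Or.inr ⟨h2.symm, h1.symm⟩))
          · exact Or.inl (Or.inl (Or.inl ⟨h1.symm, h2.symm⟩))
          · exact Or.inr h
        · rintro (((⟨h1, h2⟩ | ⟨h1, h2⟩) | h) | h)
          · exact Or.inr (Or.inr (Or.inl ⟨h1.symm, h2.symm⟩))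
          · exact Or.inr (Or.inl ⟨h2.symm, h1.symm⟩)
          · exact Or.inl h
          · exact Or.inr (Or.inr (Or.inr h))

theorem pvRep_init {c : Int} :
    pvRep c
      ((PySem.List.pyRange 0 c).map (fun _ => (PySem.List.pyRange 0 c).map (fun _ => false)))
      (fun _ _ => false) := by
  refine ⟨by simp [PySem.List.length_pyRange_one], ?_, ?_⟩
  · intro row hmem
    rcases List.mem_map.1 hmem with ⟨_, _, rfl⟩
    simp [PySem.List.length_pyRange_one]
  · intro x y hx hx2 hy hy2
    have hlen : ((PySem.List.pyRange 0 c).map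
        (fun _ => (PySem.List.pyRange 0 c).map (fun _ => false))).length = c.toNat := by
      simp [PySem.List.length_pyRange_one]
    have hx' : x.toNat < ((PySem.List.pyRange 0 c).map
        (fun _ => (PySem.List.pyRange 0 c).map (fun _ => false))).length := by omega
    unfold pvG
    rw [pvGetD_eq _ [] x (by omega) (by omega), pvWrap_nonneg hx,
      List.getD_eq_getElem?_getD, List.getElem?_eq_getElem hx', Option.getD_some,
      List.getElem_map]
    have hy' : y.toNat < ((PySem.List.pyRange 0 c).map (fun _ => false)).length := by
      simp [PySem.List.length_pyRange_one]; omega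
    rw [pvGetD_eq _ false y (by simp [PySem.List.length_pyRange_one]; omega)
        (by simp [PySem.List.length_pyRange_one]; omega), pvWrap_nonneg hy,
      List.getD_eq_getElem?_getD, List.getElem?_eq_getElem hy', Option.getD_some,
      List.getElem_map]

-- the state of A's second loop while scanning row i, cells < t done
def pvGt (f : Int → Int → Bool) (i t : Int) (x y : Int) : Bool :=
  f x y ||
    (decide (x ≠ y) &&
      (decide (min x y < i) || (decide (min x y = i) && decide (max x y < t))))

def pvInner (i : Int) (st : List (List Bool) × List (List Int)) (j : Int) :
    List (List Bool) × List (List Int) :=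
  if i ≠ j ∧ PySem.List.pyGetD (PySem.List.pyGetD st.1 i []) j false = false then
    (pvMark (pvMark st.1 i j) j i, st.2 ++ [[i, j]])
  else st

theorem pvFilter_row {c i : Int} (h0 : 0 ≤ i) (hic : i < c) (f : Int → Int → Bool) :
    ((PySem.List.pyRange 0 c).filter (fun j => decide (i < j) && !(f i j))).map
        (fun j => [i, j]) =
      ((PySem.List.pyRange (i + 1) c).filter (fun j => !(f i j))).map
        (fun j => [i, j]) := by
  rw [PySem.List.pyRange_one_append 0 (i + 1) c (by omega) (by omega), List.filter_append]
  have h1 : (PySem.List.pyRange 0 (i + 1)).filter (fun j => decide (i < j) && !(f i j)) = [] := by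
    refine List.filter_eq_nil_iff.2 ?_
    intro j hj
    have := PySem.List.mem_pyRange_one.1 hj
    simp [show ¬ (i < j) by omega]
  have h2 : (PySem.List.pyRange (i + 1) c).filter (fun j => decide (i < j) && !(f i j)) =
      (PySem.List.pyRange (i + 1) c).filter (fun j => !(f i j)) := by
    refine List.filter_congr ?_
    intro j hj
    have := PySem.List.mem_pyRange_one.1 hj
    simp [show i < j by omega]
  rw [h1, h2, List.nil_append]

theorem pvInner_run {c : Int} {f : Int → Int → Bool} (hc : 0 < c) {i : Int}
    (hi1 : 0 ≤ i) (hi2 : i < c) (hsym : ∀ x y, f x y = f y x) :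
    ∀ (t : Int) (m : List (List Bool)) (ans : List (List Int)),
      0 ≤ t → t ≤ c → pvRep c m (pvGt f i t) →
      ∃ m',
        (PySem.List.pyRange t c).foldl (pvInner i) (m, ans) =
          (m', ans ++
            ((PySem.List.pyRange t c).filter
                (fun j => decide (i < j) && !(f i j))).map (fun j => [i, j])) ∧
        pvRep c m' (pvGt f i c) := by
  have H : ∀ (n : Nat) (t : Int), (c - t).toNat = n →
      ∀ (m : List (List Bool)) (ans : List (List Int)),
      0 ≤ t → t ≤ c → pvRep c m (pvGt f i t) →
      ∃ m',
        (PySem.List.pyRange t c).foldl (pvInner i) (m, ans) =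
          (m', ans ++
            ((PySem.List.pyRange t c).filter
                (fun j => decide (i < j) && !(f i j))).map (fun j => [i, j])) ∧
        pvRep c m' (pvGt f i c) := by
    intro n
    induction n with
    | zero =>
      intro t ht m ans ht0 htc hrep
      have htc' : t = c := by omega
      subst htc'
      rw [PySem.List.pyRange_one_eq_nil (le_refl t)]
      exact ⟨m, by simp, hrep⟩
    | succ n ihn =>
      intro t ht m ans ht0 htc hrep
      have htc' : t < c := by omega
      rw [PySem.List.pyRange_one_cons htc']
      simp only [List.foldl_cons, List.filter_cons]
      rcases lt_trichotomy t i with hti | hti | hti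
      · -- t < i : the cell was already marked when row t ran
        have hstep : pvInner i (m, ans) t = (m, ans) := by
          unfold pvInner
          rw [if_neg]
          intro ⟨hne, hval⟩
          rw [show PySem.List.pyGetD (PySem.List.pyGetD m i []) t false = pvG m i t from rfl,
            hrep.2.2 i t hi1 hi2 (by omega) (by omega)] at hval
          have htrue : pvGt f i t i t = true := by
            simp only [pvGt, Bool.or_eq_true, Bool.and_eq_true, decide_eq_true_eq]
            exact Or.inr ⟨by omega, Or.inl (by omega)⟩
          rw [htrue] at hval
          simp at hval
        rw [hstep]
        have hrep' : pvRep c m (pvGt f i (t + 1)) := by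
          refine pvRep_congr hrep ?_
          intro x y hx hx2 hy hy2
          rw [Bool.eq_iff_iff]
          simp only [pvGt, Bool.or_eq_true, Bool.and_eq_true, decide_eq_true_eq]
          constructor <;> rintro (h | ⟨h1, h2⟩)
          · exact Or.inl h
          · exact Or.inr ⟨h1, by omega⟩
          · exact Or.inl h
          · exact Or.inr ⟨h1, by omega⟩
        obtain ⟨m', heq, hrep''⟩ := ihn (t + 1) (by omega) m ans (by omega) (by omega) hrep'
        refine ⟨m', ?_, hrep''⟩
        rw [heq]
        rw [if_neg (by simp [show ¬ (i < t) by omega])]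
      · -- t = i : the diagonal cell, skipped
        have hstep : pvInner i (m, ans) t = (m, ans) := by
          unfold pvInner
          rw [if_neg]
          intro ⟨hne, _⟩
          exact hne hti.symm
        rw [hstep]
        have hrep' : pvRep c m (pvGt f i (t + 1)) := by
          refine pvRep_congr hrep ?_
          intro x y hx hx2 hy hy2
          rw [Bool.eq_iff_iff]
          simp only [pvGt, Bool.or_eq_true, Bool.and_eq_true, decide_eq_true_eq]
          constructor <;> rintro (h | ⟨h1, h2⟩)
          · exact Or.inl h
          · exact Or.inr ⟨h1, by omega⟩
          · exact Or.inl h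
          · exact Or.inr ⟨h1, by omega⟩
        obtain ⟨m', heq, hrep''⟩ := ihn (t + 1) (by omega) m ans (by omega) (by omega) hrep'
        refine ⟨m', ?_, hrep''⟩
        rw [heq]
        rw [if_neg (by simp [show ¬ (i < t) by omega])]
      · -- i < t : a genuine upper-triangle cell of row i
        have hGval : pvG m i t = f i t := by
          rw [hrep.2.2 i t hi1 hi2 (by omega) (by omega)]
          rw [Bool.eq_iff_iff]
          simp only [pvGt, Bool.or_eq_true, Bool.and_eq_true, decide_eq_true_eq]
          constructor
          · rintro (h | ⟨h1, h2⟩)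
            · exact h
            · omega
          · exact fun h => Or.inl h
        cases hft : f i t with
        | true =>
          have hstep : pvInner i (m, ans) t = (m, ans) := by
            unfold pvInner
            rw [if_neg]
            intro ⟨hne, hval⟩
            rw [show PySem.List.pyGetD (PySem.List.pyGetD m i []) t false = pvG m i t from rfl,
              hGval, hft] at hval
            simp at hval
          rw [hstep]
          have hrep' : pvRep c m (pvGt f i (t + 1)) := by
            refine pvRep_congr hrep ?_
            intro x y hx hx2 hy hy2
            rw [Bool.eq_iff_iff]
            simp only [pvGt, Bool.or_eq_true, Bool.and_eq_true, decide_eq_true_eq]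
            constructor <;> rintro (h | ⟨h1, h2⟩)
            · exact Or.inl h
            · exact Or.inr ⟨h1, by omega⟩
            · exact Or.inl h
            · rcases (by omega : (min x y < i ∨ (min x y = i ∧ max x y < t)) ∨
                  ((x = i ∧ y = t) ∨ (x = t ∧ y = i))) with h3 | h3 | h3
              · exact Or.inr ⟨h1, h3⟩
              · exact Or.inl (by rw [h3.1, h3.2]; exact hft)
              · exact Or.inl (by rw [h3.1, h3.2, hsym]; exact hft)
          obtain ⟨m', heq, hrep''⟩ := ihn (t + 1) (by omega) m ans (by omega) (by omega) hrep'
          refine ⟨m', ?_, hrep''⟩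
          rw [heq]
          rw [if_neg (by simp)]
        | false =>
          have hstep : pvInner i (m, ans) t =
              (pvMark (pvMark m i t) t i, ans ++ [[i, t]]) := by
            unfold pvInner
            rw [if_pos]
            exact ⟨by omega, by
              rw [show PySem.List.pyGetD (PySem.List.pyGetD m i []) t false = pvG m i t from rfl,
                hGval, hft]⟩
          rw [hstep]
          have h1 := pvRep_mark hrep (by omega : -c ≤ i) hi2 (by omega : -c ≤ t) (by omega) hc
          have h2 := pvRep_mark h1 (by omega : -c ≤ t) (by omega) (by omega : -c ≤ i) hi2 hc
          have hrep' : pvRep c (pvMark (pvMark m i t) t i) (pvGt f i (t + 1)) := by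
            refine pvRep_congr h2 ?_
            intro x y hx hx2 hy hy2
            rw [pvWrap_nonneg hi1, pvWrap_nonneg (by omega : (0:Int) ≤ t)]
            rw [Bool.eq_iff_iff]
            simp only [pvGt, Bool.or_eq_true, Bool.and_eq_true, decide_eq_true_eq]
            constructor
            · rintro (⟨h1', h2'⟩ | (⟨h1', h2'⟩ | (h | ⟨h1', h2'⟩)))
              · exact Or.inr ⟨by omega, by omega⟩
              · exact Or.inr ⟨by omega, by omega⟩
              · exact Or.inl h
              · exact Or.inr ⟨h1', by omega⟩
            · rintro (h | ⟨h1', h2'⟩)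
              · exact Or.inr (Or.inr (Or.inl h))
              · rcases (by omega : (min x y < i ∨ (min x y = i ∧ max x y < t)) ∨
                    ((x = i ∧ y = t) ∨ (x = t ∧ y = i))) with h3 | h3 | h3
                · exact Or.inr (Or.inr (Or.inr ⟨h1', h3⟩))
                · exact Or.inr (Or.inl ⟨h3.1, h3.2⟩)
                · exact Or.inl ⟨h3.1, h3.2⟩
          obtain ⟨m', heq, hrep''⟩ :=
            ihn (t + 1) (by omega) (pvMark (pvMark m i t) t i) (ans ++ [[i, t]])
              (by omega) (by omega) hrep'
          refine ⟨m', ?_, hrep''⟩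
          rw [heq]
          rw [if_pos (by simp [show i < t from hti])]
          simp
  exact fun t m ans ht0 htc hrep => H (c - t).toNat t rfl m ans ht0 htc hrep

theorem pvOuter_run {c : Int} {f : Int → Int → Bool} (hc : 0 < c)
    (hsym : ∀ x y, f x y = f y x) :
    ∀ (k : Int) (m : List (List Bool)) (ans : List (List Int)),
      0 ≤ k → k ≤ c →
      pvRep c m (fun x y => f x y || (decide (x ≠ y) && decide (min x y < k))) →
      ((PySem.List.pyRange k c).foldl
          (fun st i => (PySem.List.pyRange 0 c).foldl (pvInner i) st) (m, ans)).2 =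
        ans ++
          (PySem.List.pyRange k c).flatMap (fun i =>
            ((PySem.List.pyRange (i + 1) c).filter (fun j => !(f i j))).map
              (fun j => [i, j])) := by
  have H : ∀ (n : Nat) (k : Int), (c - k).toNat = n →
      ∀ (m : List (List Bool)) (ans : List (List Int)),
      0 ≤ k → k ≤ c →
      pvRep c m (fun x y => f x y || (decide (x ≠ y) && decide (min x y < k))) →
      ((PySem.List.pyRange k c).foldl
          (fun st i => (PySem.List.pyRange 0 c).foldl (pvInner i) st) (m, ans)).2 =
        ans ++
          (PySem.List.pyRange k c).flatMap (fun i =>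
            ((PySem.List.pyRange (i + 1) c).filter (fun j => !(f i j))).map
              (fun j => [i, j])) := by
    intro n
    induction n with
    | zero =>
      intro k hk m ans hk0 hkc hrep
      have hkc' : k = c := by omega
      subst hkc'
      rw [PySem.List.pyRange_one_eq_nil (le_refl k)]
      simp
    | succ n ihn =>
      intro k hk m ans hk0 hkc hrep
      have hkc' : k < c := by omega
      rw [PySem.List.pyRange_one_cons hkc']
      simp only [List.foldl_cons]
      have hrep0 : pvRep c m (pvGt f k 0) := by
        refine pvRep_congr hrep ?_
        intro x y hx hx2 hy hy2
        rw [Bool.eq_iff_iff]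
        simp only [pvGt, Bool.or_eq_true, Bool.and_eq_true, decide_eq_true_eq]
        constructor <;> rintro (h | ⟨h1, h2⟩)
        · exact Or.inl h
        · exact Or.inr ⟨h1, by omega⟩
        · exact Or.inl h
        · exact Or.inr ⟨h1, by omega⟩
      obtain ⟨m', heq, hrep'⟩ :=
        pvInner_run hc hk0 hkc' hsym 0 m ans (le_refl 0) (by omega) hrep0
      rw [heq]
      have hrep'' : pvRep c m'
          (fun x y => f x y || (decide (x ≠ y) && decide (min x y < k + 1))) := by
        refine pvRep_congr hrep' ?_
        intro x y hx hx2 hy hy2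
        rw [Bool.eq_iff_iff]
        simp only [pvGt, Bool.or_eq_true, Bool.and_eq_true, decide_eq_true_eq]
        constructor <;> rintro (h | ⟨h1, h2⟩)
        · exact Or.inl h
        · exact Or.inr ⟨h1, by omega⟩
        · exact Or.inl h
        · exact Or.inr ⟨h1, by omega⟩
      rw [ihn (k + 1) (by omega) m' _ (by omega) (by omega) hrep'']
      rw [pvFilter_row hk0 hkc' f]
      simp [List.flatMap_cons, List.append_assoc]
  exact fun k m ans hk0 hkc hrep => H (c - k).toNat k rfl m ans hk0 hkc hrep

-- A computes: all upper-triangle pairs not covered by a road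
theorem pvA_char {c : Int} {r : List (List Int)} (hc : 0 < c)
    (hpre : ∀ e ∈ r, 2 ≤ e.length ∧ ∀ v ∈ e.take 2, -c ≤ v ∧ v < c) :
    roadsBuilding c r =
      (PySem.List.pyRange 0 c).flatMap (fun i =>
        ((PySem.List.pyRange (i + 1) c).filter (fun j => !(pvCov c r i j))).map
          (fun j => [i, j])) := by
  show ((PySem.List.pyRange 0 c).foldl
      (fun st i => (PySem.List.pyRange 0 c).foldl (pvInner i) st)
      ((PySem.List.pyRange 0 (PySem.List.len r)).foldl
        (fun m i =>
          (fun m e =>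
            pvMark (pvMark m (PySem.List.pyGetD e 0 0) (PySem.List.pyGetD e 1 0))
              (PySem.List.pyGetD e 1 0) (PySem.List.pyGetD e 0 0)) m
            (PySem.List.pyGetD r i []))
        ((PySem.List.pyRange 0 c).map (fun _ => (PySem.List.pyRange 0 c).map (fun _ => false))),
       ([] : List (List Int)))).2 = _
  rw [PySem.List.foldl_pyRange_zero_pyGetD r ([] : List Int)
    (fun m e =>
      pvMark (pvMark m (PySem.List.pyGetD e 0 0) (PySem.List.pyGetD e 1 0))
        (PySem.List.pyGetD e 1 0) (PySem.List.pyGetD e 0 0))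
    ((PySem.List.pyRange 0 c).map (fun _ => (PySem.List.pyRange 0 c).map (fun _ => false)))]
  have hrep1 := pvRep_loop1 hc r
    ((PySem.List.pyRange 0 c).map (fun _ => (PySem.List.pyRange 0 c).map (fun _ => false)))
    (fun _ _ => false) pvRep_init (fun e he => hpre e he)
  have hrep2 := pvRep_congr hrep1
    (g := fun x y => pvCov c r x y || (decide (x ≠ y) && decide (min x y < 0)))
    (by
      intro x y hx hx2 hy hy2
      simp [show ¬ (min x y < 0) from by omega])
  rw [pvOuter_run hc (pvCov_symm c r) 0 _ [] (le_refl 0) (le_of_lt hc) hrep2]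
  rw [List.nil_append]

-- ===== B-side lemmas =====

-- the upper-triangle pair stream, in A's and B's common traversal order
def pvPairs (c : Int) : List (Int × Int) :=
  (PySem.List.pyRange 0 c).flatMap (fun i =>
    (PySem.List.pyRange (i + 1) c).map (fun j => (i, j)))

-- B's sorted edge-code list
def pvEdges (c : Int) (r : List (List Int)) : List Int :=
  PySem.List.sorted
    (PySem.Set.ofList
      ((r.filter (fun e =>
          PySem.Int.mod (PySem.List.pyGetD e 0 0) c !=
          PySem.Int.mod (PySem.List.pyGetD e 1 0) c)).map
        (fun e =>
          min (PySem.Int.mod (PySem.List.pyGetD e 0 0) c)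
              (PySem.Int.mod (PySem.List.pyGetD e 1 0) c) * c +
          max (PySem.Int.mod (PySem.List.pyGetD e 0 0) c)
              (PySem.Int.mod (PySem.List.pyGetD e 1 0) c))))
    (fun x => x) false

-- the merge sweep: a pointer walk through a strictly increasing sublist equals a filter
theorem pvMerge (cf : Int × Int → Int) :
    ∀ (ps : List (Int × Int)) (rem : List Int) (ans : List (List Int)),
      rem.Pairwise (· < ·) → (∀ x ∈ rem, x ∈ ps.map cf) → (ps.map cf).Pairwise (· < ·) →
      (ps.foldl
          (fun st p =>
            if st.1 = some (cf p) then (st.2.1.head?, st.2.1.tail, st.2.2)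
            else (st.1, st.2.1, st.2.2 ++ [[p.1, p.2]]))
          (rem.head?, rem.tail, ans)).2.2 =
        ans ++ (ps.filter (fun p => !(rem.contains (cf p)))).map (fun p => [p.1, p.2]) := by
  intro ps
  induction ps with
  | nil =>
    intro rem ans _ _ _
    simp
  | cons p ps ih =>
    intro rem ans hso hmem hps
    rw [List.map_cons, List.pairwise_cons] at hps
    obtain ⟨hcp, hps'⟩ := hps
    cases rem with
    | nil =>
      simp only [List.head?_nil, List.tail_nil, List.foldl_cons]
      rw [if_neg (by simp)]
      have h := ih [] (ans ++ [[p.1, p.2]]) (by simp) (by simp) hps'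
      simp only [List.head?_nil, List.tail_nil] at h
      rw [h]
      simp [List.append_assoc]
    | cons x t =>
      have hxmem : x ∈ cf p :: ps.map cf := by simpa using hmem x (by simp)
      have htmem : ∀ y ∈ t, y ∈ cf p :: ps.map cf := fun y hy => by
        simpa using hmem y (by simp [hy])
      have hxt : ∀ y ∈ t, x < y := (List.pairwise_cons.1 hso).1
      have hso' : t.Pairwise (· < ·) := (List.pairwise_cons.1 hso).2
      simp only [List.head?_cons, List.tail_cons, List.foldl_cons]
      by_cases hx : x = cf p
      · rw [if_pos (by rw [hx])]
        have htmem' : ∀ y ∈ t, y ∈ ps.map cf := by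
          intro y hy
          rcases List.mem_cons.1 (htmem y hy) with h | h
          · exact absurd h (by have := hxt y hy; omega)
          · exact h
        rw [ih t ans hso' htmem' hps']
        congr 1
        rw [List.filter_cons]
        rw [if_neg (by simp [hx])]
        refine congrArg _ (List.filter_congr ?_)
        intro q hq
        have hgt : cf p < cf q := hcp _ (List.mem_map_of_mem hq)
        have hne2 : (cf q == x) = false := by
          simp only [beq_eq_false_iff_ne, ne_eq]
          omega
        simp only [List.contains_cons, hne2, Bool.false_or]
      · rw [if_neg (by simp [Ne.symm, hx])]
        have hxps : x ∈ ps.map cf := by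
          rcases List.mem_cons.1 hxmem with h | h
          · exact absurd h hx
          · exact h
        have hxgt : cf p < x := hcp _ hxps
        have hmem' : ∀ y ∈ x :: t, y ∈ ps.map cf := by
          intro y hy
          rcases List.mem_cons.1 hy with rfl | hy
          · exact hxps
          · rcases List.mem_cons.1 (htmem y hy) with h | h
            · exact absurd h (by have := hxt y hy; omega)
            · exact h
        have h := ih (x :: t) (ans ++ [[p.1, p.2]]) hso hmem' hps'
        simp only [List.head?_cons, List.tail_cons] at h
        rw [h]
        rw [List.filter_cons]
        have hnc : ((x :: t).contains (cf p)) = false := by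
          rw [Bool.eq_false_iff]
          intro hcon
          rcases List.mem_cons.1 (List.contains_iff_mem.1 hcon) with h | h
          · omega
          · have := hxt _ h
            omega
        rw [if_pos (by simp only [hnc, Bool.not_false])]
        simp [List.append_assoc]

-- endpoint-pair code is injective on the upper triangle
theorem pvCode_inj {c m M i j : Int} (_hm : 0 ≤ m) (hM1 : 0 ≤ M) (hM2 : M < c)
    (hi : 0 ≤ i) (hj1 : 0 ≤ j) (hj2 : j < c) (h : m * c + M = i * c + j) :
    m = i ∧ M = j := by
  have hme : m = i := by
    rcases lt_trichotomy m i with hlt | heq | hgt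
    · have h2 : (m + 1) * c ≤ i * c := mul_le_mul_of_nonneg_right (by omega) (by omega)
      nlinarith
    · exact heq
    · have h2 : (i + 1) * c ≤ m * c := mul_le_mul_of_nonneg_right (by omega) (by omega)
      nlinarith
  subst hme
  constructor
  · rfl
  · linarith

-- codes along the pair stream are strictly increasing
theorem pvPairs_codes_sorted {c : Int} :
    ((pvPairs c).map (fun p => p.1 * c + p.2)).Pairwise (· < ·) := by
  unfold pvPairs
  rw [List.map_flatMap]
  rw [List.pairwise_flatMap]
  refine ⟨?_, ?_⟩
  · intro i hi
    rw [List.map_map, List.pairwise_map]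
    refine List.Pairwise.imp ?_ (PySem.List.pairwise_lt_pyRange_one (a := i + 1) (b := c))
    intro a b hab
    show i * c + a < i * c + b
    linarith
  · refine List.Pairwise.imp_of_mem (fun {i1 i2} hm1 hm2 h12 => ?_)
      (PySem.List.pairwise_lt_pyRange_one (a := (0:Int)) (b := c))
    intro x hx y hy
    have hi1 := PySem.List.mem_pyRange_one.1 hm1
    have hi2 := PySem.List.mem_pyRange_one.1 hm2
    rw [List.map_map] at hx hy
    rcases List.mem_map.1 hx with ⟨j1, hj1, rfl⟩
    rcases List.mem_map.1 hy with ⟨j2, hj2, rfl⟩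
    have hb1 := PySem.List.mem_pyRange_one.1 hj1
    have hb2 := PySem.List.mem_pyRange_one.1 hj2
    show i1 * c + j1 < i2 * c + j2
    have h2 : (i1 + 1) * c ≤ i2 * c := mul_le_mul_of_nonneg_right (by omega) (by omega)
    linarith

theorem pvMem_pairs {c i j : Int} : (i, j) ∈ pvPairs c ↔ 0 ≤ i ∧ i < j ∧ j < c := by
  unfold pvPairs
  rw [List.mem_flatMap]
  constructor
  · rintro ⟨i', hi', hmem⟩
    rcases List.mem_map.1 hmem with ⟨j', hj', heq⟩
    obtain ⟨rfl, rfl⟩ : i' = i ∧ j' = j := by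
      exact ⟨congrArg Prod.fst heq, congrArg Prod.snd heq⟩
    have h1 := PySem.List.mem_pyRange_one.1 hi'
    have h2 := PySem.List.mem_pyRange_one.1 hj'
    omega
  · rintro ⟨h1, h2, h3⟩
    exact ⟨i, PySem.List.mem_pyRange_one.2 (by omega), List.mem_map.2
      ⟨j, PySem.List.mem_pyRange_one.2 (by omega), rfl⟩⟩

-- membership in B's sorted code list
theorem pvMem_edges {c : Int} {r : List (List Int)} {x : Int} :
    x ∈ pvEdges c r ↔
      ∃ e ∈ r,
        PySem.Int.mod (PySem.List.pyGetD e 0 0) c ≠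
          PySem.Int.mod (PySem.List.pyGetD e 1 0) c ∧
        min (PySem.Int.mod (PySem.List.pyGetD e 0 0) c)
            (PySem.Int.mod (PySem.List.pyGetD e 1 0) c) * c +
          max (PySem.Int.mod (PySem.List.pyGetD e 0 0) c)
              (PySem.Int.mod (PySem.List.pyGetD e 1 0) c) = x := by
  unfold pvEdges
  rw [PySem.List.mem_sorted, PySem.Set.mem_ofList, List.mem_map]
  constructor
  · rintro ⟨e, he, rfl⟩
    rcases List.mem_filter.1 he with ⟨he', hne⟩
    exact ⟨e, he', by simpa using hne, rfl⟩
  · rintro ⟨e, he, hne, rfl⟩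
    exact ⟨e, List.mem_filter.2 ⟨he, by simpa using hne⟩, rfl⟩

theorem pvEdges_sorted {c : Int} {r : List (List Int)} :
    (pvEdges c r).Pairwise (· < ·) :=
  PySem.List.sorted_ofList_pairwise_lt _

-- B's sweep equals the code-filtered pair stream
theorem pvB_char {c : Int} {r : List (List Int)}
    (hpre : Pre_roadsBuilding c r) :
    roadsBuilding_alt c r =
      ((pvPairs c).filter
          (fun p => !((pvEdges c r).contains (p.1 * c + p.2)))).map
        (fun p => [p.1, p.2]) := by
  have hfold :
      roadsBuilding_alt c r =
        ((pvPairs c).foldl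
          (fun st p =>
            if st.1 = some (p.1 * c + p.2) then (st.2.1.head?, st.2.1.tail, st.2.2)
            else (st.1, st.2.1, st.2.2 ++ [[p.1, p.2]]))
          ((pvEdges c r).head?, (pvEdges c r).tail, ([] : List (List Int)))).2.2 := by
    simp only [roadsBuilding_alt, pvEdges, pvPairs, List.foldl_flatMap, List.foldl_map]
  rw [hfold]
  rw [pvMerge (fun p => p.1 * c + p.2) (pvPairs c) (pvEdges c r) [] pvEdges_sorted ?_
    pvPairs_codes_sorted]
  · simp
  · intro x hx
    rcases pvMem_edges.1 hx with ⟨e, he, hne, hcode⟩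
    obtain ⟨hlen2, hbnd⟩ := hpre e he
    cases e with
    | nil => simp at hlen2
    | cons a e1 =>
      cases e1 with
      | nil => simp at hlen2
      | cons b t =>
        have ha := hbnd a (by simp)
        have hb := hbnd b (by simp)
        have hc : 0 < c := by omega
        rw [pvGetD_zero', pvGetD_one] at hne hcode
        rw [PySem.Int.mod_eq_emod_of_pos hc, PySem.Int.mod_eq_emod_of_pos hc,
          pvWrap_emod hc ha.1 ha.2, pvWrap_emod hc hb.1 hb.2] at hne hcode
        have hwa := pvWrap_bounds ha.1 ha.2
        have hwb := pvWrap_bounds hb.1 hb.2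
        refine List.mem_map.2 ⟨(min (pvWrap c a) (pvWrap c b),
          max (pvWrap c a) (pvWrap c b)), ?_, hcode⟩
        exact pvMem_pairs.2 ⟨by omega, by omega, by omega⟩

-- on the upper triangle, A's covering predicate is B's code membership
theorem pvCov_eq_contains {c : Int} {r : List (List Int)}
    (hpre : Pre_roadsBuilding c r) (hc : 0 < c)
    {i j : Int} (hi : 0 ≤ i) (hij : i < j) (hj : j < c) :
    pvCov c r i j = (pvEdges c r).contains (i * c + j) := by
  rw [Bool.eq_iff_iff]
  rw [List.contains_iff_mem, pvMem_edges]
  unfold pvCov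
  rw [List.any_eq_true]
  constructor
  · rintro ⟨e, he, hb⟩
    obtain ⟨hlen2, hbnd⟩ := hpre e he
    cases e with
    | nil => simp at hlen2
    | cons a e1 =>
      cases e1 with
      | nil => simp at hlen2
      | cons b t =>
        have ha := hbnd a (by simp)
        have hb2 := hbnd b (by simp)
        simp only [pvEnds?, Bool.or_eq_true, Bool.and_eq_true, beq_iff_eq] at hb
        refine ⟨a :: b :: t, he, ?_⟩
        rw [pvGetD_zero', pvGetD_one]
        rw [PySem.Int.mod_eq_emod_of_pos hc, PySem.Int.mod_eq_emod_of_pos hc,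
          pvWrap_emod hc ha.1 ha.2, pvWrap_emod hc hb2.1 hb2.2]
        rcases hb with ⟨h1, h2⟩ | ⟨h1, h2⟩
        · exact ⟨by omega, by rw [h1, h2]; rw [min_eq_left (by omega), max_eq_right (by omega)]⟩
        · exact ⟨by omega, by rw [h1, h2]; rw [min_eq_right (by omega), max_eq_left (by omega)]⟩
  · rintro ⟨e, he, hne, hcode⟩
    obtain ⟨hlen2, hbnd⟩ := hpre e he
    cases e with
    | nil => simp at hlen2
    | cons a e1 =>
      cases e1 with
      | nil => simp at hlen2
      | cons b t =>
        have ha := hbnd a (by simp)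
        have hb2 := hbnd b (by simp)
        rw [pvGetD_zero', pvGetD_one] at hne hcode
        rw [PySem.Int.mod_eq_emod_of_pos hc, PySem.Int.mod_eq_emod_of_pos hc,
          pvWrap_emod hc ha.1 ha.2, pvWrap_emod hc hb2.1 hb2.2] at hne hcode
        have hwa := pvWrap_bounds ha.1 ha.2
        have hwb := pvWrap_bounds hb2.1 hb2.2
        have hmm := pvCode_inj (c := c) (by omega) (by omega) (by omega) hi (by omega) hj hcode
        refine ⟨a :: b :: t, he, ?_⟩
        simp only [pvEnds?, Bool.or_eq_true, Bool.and_eq_true, beq_iff_eq]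
        rcases le_total (pvWrap c a) (pvWrap c b) with hab | hab
        · rw [min_eq_left hab, max_eq_right hab] at hmm
          exact Or.inl ⟨hmm.1, hmm.2⟩
        · rw [min_eq_right hab, max_eq_left hab] at hmm
          exact Or.inr ⟨hmm.2, hmm.1⟩

-- the filtered pair stream in flatMap form
theorem pvStream_reshape {c : Int} (g : Int → Int → Bool) :
    ((pvPairs c).filter (fun p => g p.1 p.2)).map (fun p => [p.1, p.2]) =
      (PySem.List.pyRange 0 c).flatMap (fun i =>
        ((PySem.List.pyRange (i + 1) c).filter (fun j => g i j)).map
          (fun j => [i, j])) := by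
  unfold pvPairs
  rw [List.filter_flatMap, List.map_flatMap]
  refine List.flatMap_congr ?_
  intro i _
  rw [List.filter_map, List.map_map]
  rfl

theorem roadsBuilding_spec : Claim_equal_roadsBuilding := by
  intro c r _ hpre
  unfold Spec_roadsBuilding
  by_cases hc : 0 < c
  · rw [pvA_char hc hpre]
    rw [pvB_char hpre]
    have hre :
        ((pvPairs c).filter
            (fun p => !((pvEdges c r).contains (p.1 * c + p.2)))).map
          (fun p => [p.1, p.2]) =
        (PySem.List.pyRange 0 c).flatMap (fun i =>
          ((PySem.List.pyRange (i + 1) c).filter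
              (fun j => !((pvEdges c r).contains (i * c + j)))).map
            (fun j => [i, j])) :=
      pvStream_reshape (fun i j => !((pvEdges c r).contains (i * c + j)))
    rw [hre]
    refine (List.flatMap_congr ?_).symm
    intro i hi
    have hi' := PySem.List.mem_pyRange_one.1 hi
    refine congrArg _ (List.filter_congr ?_)
    intro j hj
    have hj' := PySem.List.mem_pyRange_one.1 hj
    exact congrArg (fun bb => !bb)
      (pvCov_eq_contains hpre hc (by omega) (by omega) (by omega)).symm
  · have hr : r = [] := by
      cases r with
      | nil => rfl
      | cons e l =>
        obtain ⟨hlen2, hbnd⟩ := hpre e (by simp)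
        cases e with
        | nil => simp at hlen2
        | cons a t =>
          have := hbnd a (by simp)
          omega
    subst hr
    have h0 : PySem.List.pyRange 0 c = [] := PySem.List.pyRange_one_eq_nil (by omega)
    have h1 : PySem.List.pyRange 0 (PySem.List.len ([] : List (List Int))) = [] :=
      PySem.List.pyRange_one_eq_nil (by simp [PySem.List.len])
    simp [roadsBuilding, roadsBuilding_alt, h0]
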